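-- pv_equiv track=rewrite | github.com/zdhughes91/Texas-Hold-Em | PokerCode.py | ShowCards
-- ===== SOURCE A (Python) =====
-- def ShowCards(cards):
--     show = ['2s','3s','4s','5s','6s','7s','8s','9s','10s','Js','Qs','Ks','As',
--             '2c','3c','4c','5c','6c','7c','8c','9c','10c','Jc','Qc','Kc','Ac',
--             '2h','3h','4h','5h','6h','7h','8h','9h','10h','Jh','Qh','Kh','Ah',
--             '2d','3d','4d','5d','6d','7d','8d','9d','10d','Jd','Qd','Kd','Ad']
--     ShowCards = []
--     for i in range(len(cards)):
--         ShowCards.append(show[int(cards[i])])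
--     return(ShowCards)
-- ===== SOURCE B (Python) =====
-- def ShowCards(cards):
--     ranks = '2 3 4 5 6 7 8 9 10 J Q K A'.split()
--     idx = [int(c) for c in cards]
--     rank_part = [ranks[i % 13] for i in idx]
--     suit_part = ['schd'[i // 13] for i in idx]
--     return [r + s for r, s in zip(rank_part, suit_part)]
-- ===== Notes on version B (the rewrite author's own statement) =====
-- stated objective: simpler
-- what changed: Removes the hand-written 52-entry lookup table: B builds the rank column and the suit column in separate comprehension passes (ranks from a split string via i % 13, suits via floor-division into 'schd') and zips the two columns into the card names, instead of A's single index loop over range(len(cards)) with a flat-table lookup.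
import Mathlib
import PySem

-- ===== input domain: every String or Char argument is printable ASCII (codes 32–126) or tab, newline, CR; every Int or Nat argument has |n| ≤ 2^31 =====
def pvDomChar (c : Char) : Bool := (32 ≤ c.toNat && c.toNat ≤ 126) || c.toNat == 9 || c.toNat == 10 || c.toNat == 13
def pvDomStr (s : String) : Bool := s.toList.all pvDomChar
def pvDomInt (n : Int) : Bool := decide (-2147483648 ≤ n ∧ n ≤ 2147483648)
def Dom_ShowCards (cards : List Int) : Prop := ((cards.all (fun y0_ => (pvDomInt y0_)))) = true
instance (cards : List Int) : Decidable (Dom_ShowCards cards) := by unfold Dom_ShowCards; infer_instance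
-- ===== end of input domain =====

-- B drops A's hand-written 52-entry table: it builds rank and suit columns in separate comprehension passes (ranks from a split string, suits by floor-division into 'schd') and zips them together; objective: simpler.

-- ===== PORT A =====
-- the 52-entry table A builds locally
def pvShowTable : List String :=
  ["2s","3s","4s","5s","6s","7s","8s","9s","10s","Js","Qs","Ks","As",
   "2c","3c","4c","5c","6c","7c","8c","9c","10c","Jc","Qc","Kc","Ac",
   "2h","3h","4h","5h","6h","7h","8h","9h","10h","Jh","Qh","Kh","Ah",
   "2d","3d","4d","5d","6d","7d","8d","9d","10d","Jd","Qd","Kd","Ad"]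

-- for i in range(len(cards)): ShowCards.append(show[int(cards[i])])
-- table lookup via pyGetD: total stand-in for show[...]; Pre_ keeps every index in range
def ShowCards (cards : List Int) : List String :=
  (PySem.List.pyRange 0 (PySem.List.len cards) 1).foldl
    (fun acc i => acc ++ [PySem.List.pyGetD pvShowTable (PySem.List.pyGetD cards i 0) ""]) []

-- ===== PORT B =====
-- ranks = '2 3 4 5 6 7 8 9 10 J Q K A'.split()
def pvRanksB : List String := PySem.Str.split₀ "2 3 4 5 6 7 8 9 10 J Q K A"

-- idx = [int(c) for c in cards]; rank_part / suit_part comprehensions; zip-and-concatenate.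
-- 'schd'[i // 13] is a one-character string; it is ported as the looked-up Char wrapped
-- back into a String at the concatenation (String.ofList [·]) — exact for single-char indexing.
def ShowCards_alt (cards : List Int) : List String :=
  let idx := cards.map (fun c => c)
  let rankPart := idx.map (fun i => PySem.List.pyGetD pvRanksB (PySem.Int.mod i 13) "")
  let suitPart := idx.map (fun i => PySem.List.pyGetD "schd".toList (PySem.Int.floordiv i 13) ' ')
  (rankPart.zip suitPart).map (fun p => p.1 ++ String.ofList [p.2])

-- ===== PRECONDITION & SPEC =====
-- A raises IndexError when some card index falls outside the 52-entry table (beyond its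
-- negative-wrap range); exactly those inputs are excluded (B raises on exactly the same inputs).
def Pre_ShowCards (cards : List Int) : Prop := ∀ c ∈ cards, -52 ≤ c ∧ c < 52
instance (cards : List Int) : Decidable (Pre_ShowCards cards) := by unfold Pre_ShowCards; infer_instance

def pvWitness_ShowCards : List Int := [0, 12, 51, -1, -52]

def Spec_ShowCards (cards : List Int) (out : List String) : Prop := out = ShowCards_alt cards
instance (cards : List Int) (out : List String) : Decidable (Spec_ShowCards cards out) := by unfold Spec_ShowCards; infer_instance

-- ===== CLAIM (what is proved, stated in full; the proofs are below) =====
def Claim_equal_ShowCards : Prop := ∀ (cards : List Int), Dom_ShowCards cards → Pre_ShowCards cards → Spec_ShowCards cards (ShowCards cards)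

-- ===== LEMMAS AND PROOFS =====

-- per-card agreement: table entry = rank ++ suit for every in-range index
lemma pvCell (c : Int) (h1 : -52 ≤ c) (h2 : c < 52) :
    PySem.List.pyGetD pvShowTable c "" =
      PySem.List.pyGetD pvRanksB (PySem.Int.mod c 13) "" ++
      String.ofList [PySem.List.pyGetD "schd".toList (PySem.Int.floordiv c 13) ' '] := by
  obtain ⟨n, rfl⟩ : ∃ n : Fin 104, c = (n : Int) - 52 :=
    ⟨⟨(c + 52).toNat, by omega⟩, by simp; omega⟩
  revert n
  set_option maxRecDepth 8192 in decide

-- A's index loop is the map of the table lookup over the cards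
lemma pvA_eq_map (cards : List Int) :
    ShowCards cards = cards.map (fun c => PySem.List.pyGetD pvShowTable c "") := by
  unfold ShowCards
  rw [PySem.List.foldl_append_singleton_eq_map]
  simp only [List.nil_append]
  rw [show (fun i => PySem.List.pyGetD pvShowTable (PySem.List.pyGetD cards i 0) "")
        = (fun c => PySem.List.pyGetD pvShowTable c "") ∘ (fun i => PySem.List.pyGetD cards i 0) from rfl,
      ← List.map_map, PySem.List.map_pyGetD_pyRange_zero]

-- B's staged passes fuse to a single map over the cards
lemma pvB_eq_map (cards : List Int) :
    ShowCards_alt cards = cards.map (fun c =>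
      PySem.List.pyGetD pvRanksB (PySem.Int.mod c 13) "" ++
      String.ofList [PySem.List.pyGetD "schd".toList (PySem.Int.floordiv c 13) ' ']) := by
  unfold ShowCards_alt
  simp only [List.map_id_fun', id, List.zip_map', List.map_map]
  rfl

-- ===== VERDICT (by name: the statement is the Claim_ definition above) =====
theorem ShowCards_spec : Claim_equal_ShowCards := by
  intro cards _ hpre
  unfold Spec_ShowCards
  rw [pvA_eq_map, pvB_eq_map]
  apply List.map_congr_left
  intro c hc
  exact pvCell c (hpre c hc).1 (hpre c hc).2
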